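-- pv_equiv track=rewrite | github.com/dhruvdesai09/PartSearch | backend/main.py | normalize_designation
-- ===== SOURCE A (Python) =====
-- def normalize_designation(raw: str) -> str:
--     """
--     Convert designation:
--       - lowercase
--       - remove spaces
--       - remove '-', '/', '(', ')'
--     """
--     if raw is None:
--         return ""
--     s = raw.lower()
--     s = "".join(s.split())
--     for ch in ["-", "/", "(", ")"]:
--         s = s.replace(ch, "")
--     return s
-- ===== SOURCE B (Python) =====
-- def normalize_designation(raw: str) -> str:
--     # Single filtering pass instead of split/join plus four replace passes.
--     if raw is None:
--         return ""
--     return "".join(ch for ch in raw.lower() if not ch.isspace() and ch not in "-/()")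
-- ===== Notes on version B (the rewrite author's own statement) =====
-- stated objective: simpler
-- what changed: Replaces A's whitespace split/join pass plus four sequential replace passes with a single filtering traversal that drops whitespace and the punctuation characters in one go.
import Mathlib
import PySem

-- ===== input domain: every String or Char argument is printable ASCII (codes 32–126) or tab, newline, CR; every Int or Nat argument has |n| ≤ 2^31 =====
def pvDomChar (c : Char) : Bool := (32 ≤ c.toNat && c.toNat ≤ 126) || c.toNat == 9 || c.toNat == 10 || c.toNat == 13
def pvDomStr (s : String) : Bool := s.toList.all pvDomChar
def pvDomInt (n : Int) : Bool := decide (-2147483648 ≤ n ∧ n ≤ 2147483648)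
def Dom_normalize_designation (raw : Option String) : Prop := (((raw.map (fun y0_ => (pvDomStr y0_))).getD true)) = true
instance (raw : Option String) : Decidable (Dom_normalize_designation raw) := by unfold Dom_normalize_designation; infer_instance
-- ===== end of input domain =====

-- B replaces A's split/join whitespace pass plus four replace passes with one filtering pass (objective: simpler).

-- ===== PORT A =====
def normalize_designation (raw : Option String) : String :=
  match raw with
  | none => ""
  | some raw =>
    let s := PySem.Str.lower raw
    let s := PySem.Str.join "" (PySem.Str.split₀ s)
    (["-", "/", "(", ")"] : List String).foldl (fun s ch => PySem.Str.replace s ch "") s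

-- ===== PORT B =====
-- 'ch not in "-/()"' for a single character is membership of ch in the string's characters (exact).
def normalize_designation_alt (raw : Option String) : String :=
  match raw with
  | none => ""
  | some raw =>
    String.ofList (((PySem.Str.lower raw).toList).filter
      (fun c => !PySem.Chars.isspace c && !("-/()".toList.contains c)))

-- ===== PRECONDITION & SPEC =====
def Spec_normalize_designation (raw : Option String) (out : String) : Prop := out = normalize_designation_alt raw
instance (raw : Option String) (out : String) : Decidable (Spec_normalize_designation raw out) := by unfold Spec_normalize_designation; infer_instance

-- ===== CLAIM (what is proved, stated in full; the proofs are below) =====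
def Claim_equal_normalize_designation : Prop := ∀ (raw : Option String), Dom_normalize_designation raw → Spec_normalize_designation raw (normalize_designation raw)

-- ===== LEMMAS AND PROOFS =====

lemma join_nil_eq_flatten (parts : List (List Char)) :
    PySem.Chars.join [] parts = parts.flatten := by
  induction parts with
  | nil => simp [PySem.Chars.join, List.intercalate]
  | cons x xs ih =>
    cases xs with
    | nil => simp [PySem.Chars.join, List.intercalate]
    | cons y ys =>
      simp [PySem.Chars.join, List.intercalate] at ih ⊢
      simpa using ih

lemma split₀_go_flatten (cs cur : List Char) (acc : List (List Char)) :
    (PySem.Chars.split₀.go cs cur acc).flatten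
      = acc.reverse.flatten ++ cur.reverse ++ cs.filter (fun c => !PySem.Chars.isspace c) := by
  induction cs generalizing cur acc with
  | nil =>
    by_cases h : cur = []
    · simp [PySem.Chars.split₀.go, h]
    · simp [PySem.Chars.split₀.go, List.isEmpty_iff, h]
  | cons c rest ih =>
    by_cases hs : PySem.Chars.isspace c
    · by_cases h : cur = []
      · simp [PySem.Chars.split₀.go, hs, h, ih]
      · simp [PySem.Chars.split₀.go, List.isEmpty_iff, hs, h, ih]
    · simp [PySem.Chars.split₀.go, hs, ih]


lemma split₀_join (cs : List Char) :
    PySem.Chars.join [] (PySem.Chars.split₀ cs) = cs.filter (fun c => !PySem.Chars.isspace c) := by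
  rw [join_nil_eq_flatten, PySem.Chars.split₀, split₀_go_flatten]
  simp

lemma replace_go_single (c : Char) (l : List Char) (fuel : Nat) (acc : List Char)
    (h : l.length ≤ fuel) :
    PySem.Chars.replace.go [c] [] fuel l acc
      = acc.reverse ++ l.filter (fun x => !(x == c)) := by
  induction l generalizing fuel acc with
  | nil =>
    cases fuel with
    | zero => simp [PySem.Chars.replace.go]
    | succ f => simp [PySem.Chars.replace.go]
  | cons x t ih =>
    cases fuel with
    | zero => simp at h
    | succ f =>
      by_cases hx : x = c
      · have hp : List.isPrefixOf [c] (x :: t) = true := by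
          simp [List.isPrefixOf, hx]
        rw [PySem.Chars.replace.go]
        simp only [hp, if_true]
        rw [show List.drop ([c] : List Char).length (x :: t) = t by simp,
          show ([] : List Char).reverse ++ acc = acc by simp,
          ih f acc (by simpa using Nat.le_of_succ_le_succ h)]
        simp [hx]
      · have hp : List.isPrefixOf [c] (x :: t) = false := by
          simp [List.isPrefixOf]
          exact fun hxc => absurd hxc.symm hx
        rw [PySem.Chars.replace.go]
        simp only [hp]
        rw [if_neg (by simp)]
        rw [ih f (x :: acc) (by simpa using Nat.le_of_succ_le_succ h)]
        simp [hx]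

lemma replace_single (c : Char) (l : List Char) :
    PySem.Chars.replace l [c] [] = l.filter (fun x => !(x == c)) := by
  rw [PySem.Chars.replace]
  simp only [List.isEmpty_iff]
  rw [if_neg (by simp)]
  exact replace_go_single c l l.length [] le_rfl

theorem normalize_designation_spec : Claim_equal_normalize_designation := by
  unfold Claim_equal_normalize_designation
  intro raw _
  unfold Spec_normalize_designation normalize_designation normalize_designation_alt
  cases raw with
  | none => rfl
  | some s =>
    simp only [List.foldl]
    have hA :
        (PySem.Str.replace (PySem.Str.replace (PySem.Str.replace (PySem.Str.replace
          (PySem.Str.join "" (PySem.Str.split₀ (PySem.Str.lower s))) "-" "") "/" "") "(" "") ")" "")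
        = String.ofList ((((PySem.Str.lower s).toList.filter (fun c => !PySem.Chars.isspace c)).filter
            (fun x => !(x == '-'))).filter (fun x => !(x == '/')) |>.filter (fun x => !(x == '(')) |>.filter (fun x => !(x == ')'))) := by
      simp only [PySem.Str.replace, PySem.Str.join, PySem.Str.split₀, String.toList_ofList,
        List.map_map]
      rw [show (List.map (String.toList ∘ String.ofList) (PySem.Chars.split₀ (PySem.Str.lower s).toList))
            = PySem.Chars.split₀ (PySem.Str.lower s).toList by
            simp [Function.comp_def]]
      rw [show ("" : String).toList = ([] : List Char) from rfl, split₀_join]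
      simp only [show ("-" : String).toList = ['-'] from rfl,
        show ("/" : String).toList = ['/'] from rfl,
        show ("(" : String).toList = ['('] from rfl,
        show (")" : String).toList = [')'] from rfl,
        replace_single]
    rw [hA]
    apply congrArg String.ofList
    simp only [List.filter_filter]
    apply List.filter_congr
    intro a _
    simp only [List.contains, List.elem_eq_mem]
    cases h1 : a == '-' <;> cases h2 : a == '/' <;> cases h3 : a == '(' <;> cases h4 : a == ')' <;>
      cases h5 : PySem.Chars.isspace a <;> simp_all
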